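-- pv_equiv track=rewrite | github.com/lilsweetcaligula/Online-Judges | hackerrank/algorithms/implementation/easy/acm_icpc_team/py/solution.py | solution
-- ===== SOURCE A (Python) =====
-- def solution(topics):
--     import collections
--
--     topicCounts = []
--
--     for i in range(len(topics)):
--         for j in range(i + 1, len(topics)):
--             topicCounts.append(bin(int(topics[i], base=2) | int(topics[j], base=2))[2:].count('1'))
--
--     maxTopicCount = max(topicCounts)
--     maxGroupCount = collections.Counter(topicCounts)[maxTopicCount]
--
--     return maxTopicCount, maxGroupCount
-- ===== SOURCE B (Python) =====
-- def solution(topics):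
--     # Parse every topic string once, then keep running (best, count) accumulators
--     # over all pairs instead of materialising the list of pair scores.
--     vals = [int(t, base=2) for t in topics]
--     best = None
--     cnt = 0
--     for i in range(len(vals)):
--         for j in range(i + 1, len(vals)):
--             c = (vals[i] | vals[j]).bit_count()
--             if best is None or c > best:
--                 best, cnt = c, 1
--             elif c == best:
--                 cnt += 1
--     if best is None:
--         raise ValueError("max() arg is an empty sequence")
--     return best, cnt
-- ===== Notes on version B (the rewrite author's own statement) =====
-- stated objective: alternative
-- what changed: B parses each topic string once into a values list and keeps running (best, count) accumulators over the pairs, instead of re-parsing strings per pair, materialising the O(n^2) score list and re-scanning it with max() and Counter.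
import Mathlib
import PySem

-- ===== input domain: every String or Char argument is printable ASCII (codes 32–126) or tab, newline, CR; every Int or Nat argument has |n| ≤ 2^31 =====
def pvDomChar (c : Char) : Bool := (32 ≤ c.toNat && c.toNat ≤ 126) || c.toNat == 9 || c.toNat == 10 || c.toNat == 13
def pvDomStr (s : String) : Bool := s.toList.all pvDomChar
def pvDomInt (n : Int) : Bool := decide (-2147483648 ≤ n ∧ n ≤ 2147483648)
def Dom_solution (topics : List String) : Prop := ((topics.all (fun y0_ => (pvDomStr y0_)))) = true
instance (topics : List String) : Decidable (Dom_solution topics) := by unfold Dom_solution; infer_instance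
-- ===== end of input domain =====

-- B keeps running (best, count) accumulators over the pairs and parses each topic string
-- once, instead of building the O(n^2) list of scores and re-scanning it with max + Counter
-- (and re-parsing each string n-1 times); objective: simpler/alternative aggregation.
-- Both Pythons raise ValueError on unparsable strings or fewer than two topics; Pre_ excludes those.

-- ===== PORT A =====
-- bin(x)[2:].count('1') equals x.bit_count() for every Python int (also negative ones,
-- where bin gives '-0b…'); ported as PySem.Int.bitCount, exact on all of Dom.
def solution (topics : List String) : Int × Int :=
  let n : Int := PySem.List.len topics
  let topicCounts : List Int :=
    (PySem.List.pyRange 0 n 1).foldl (fun acc i =>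
      (PySem.List.pyRange (i + 1) n 1).foldl (fun acc j =>
        acc ++ [(PySem.Int.bitCount (PySem.Int.bor
          ((PySem.Int.ofStrBase? (PySem.List.pyGetD topics i "") 2).getD 0)
          ((PySem.Int.ofStrBase? (PySem.List.pyGetD topics j "") 2).getD 0)) : Int)]) acc) []
  match PySem.List.max? topicCounts (fun x => x) with
  | none => (0, 0)      -- Python: max([]) raises ValueError; excluded by Pre_
  | some m => (m, (PySem.Dict.counter topicCounts).getD m 0)

-- ===== PORT B =====
-- the if/elif chain updating (best, cnt); best is None ↦ the accumulator is none
def bstep (st : Option (Int × Int)) (c : Int) : Option (Int × Int) :=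
  match st with
  | none => some (c, 1)
  | some (b, k) => if b < c then some (c, 1) else if c = b then some (b, k + 1) else some (b, k)

def solution_alt (topics : List String) : Int × Int :=
  let vals : List Int := topics.map (fun t => (PySem.Int.ofStrBase? t 2).getD 0)
  let st : Option (Int × Int) :=
    (PySem.List.pyRange 0 (PySem.List.len vals) 1).foldl (fun st i =>
      (PySem.List.pyRange (i + 1) (PySem.List.len vals) 1).foldl (fun st j =>
        bstep st (PySem.Int.bitCount (PySem.Int.bor
          (PySem.List.pyGetD vals i 0) (PySem.List.pyGetD vals j 0)))) st) none
  match st with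
  | none => (0, 0)      -- Python: B raises ValueError here (no pairs); excluded by Pre_
  | some (b, k) => (b, k)

-- ===== PRECONDITION & SPEC =====
-- A raises ValueError when some topic string is not a valid base-2 int literal, or when
-- fewer than two topics leave max() an empty sequence; exactly those inputs are excluded.
def Pre_solution (topics : List String) : Prop :=
  (∀ s ∈ topics, (PySem.Int.ofStrBase? s 2).isSome) ∧ 2 ≤ topics.length
instance (topics : List String) : Decidable (Pre_solution topics) := by
  unfold Pre_solution; infer_instance
def pvWitness_solution : List String := ["10", "110"]
def Spec_solution (topics : List String) (out : Int × Int) : Prop := out = solution_alt topics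
instance (topics : List String) (out : Int × Int) : Decidable (Spec_solution topics out) := by unfold Spec_solution; infer_instance

-- ===== CLAIM (what is proved, stated in full; the proofs are below) =====
def Claim_equal_solution : Prop := ∀ (topics : List String), Dom_solution topics → Pre_solution topics → Spec_solution topics (solution topics)

-- ===== LEMMAS AND PROOFS =====

-- the pair-score list both loops traverse, as a flatMap
def pairScores (vals : List Int) : List Int :=
  (PySem.List.pyRange 0 (PySem.List.len vals) 1).flatMap (fun i =>
    (PySem.List.pyRange (i + 1) (PySem.List.len vals) 1).map (fun j =>
      (PySem.Int.bitCount (PySem.Int.bor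
        (PySem.List.pyGetD vals i 0) (PySem.List.pyGetD vals j 0)) : Int)))

theorem pyGetD_map_of_bounds {α β : Type} (f : α → β) (xs : List α) (i : Int) (d : α)
    (d' : β) (h0 : 0 ≤ i) (h1 : i < (xs.length : Int)) :
    PySem.List.pyGetD (xs.map f) i d' = f (PySem.List.pyGetD xs i d) := by
  rw [PySem.List.pyGetD_eq_getElem _ d' h0 (by simpa using h1),
      PySem.List.pyGetD_eq_getElem _ d h0 h1, List.getElem_map]

theorem bstep_run (t : List Int) (b k : Int) :
    t.foldl bstep (some (b, k)) =
      some (t.foldl max b,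
        (if t.foldl max b = b then k else 0) + (t.count (t.foldl max b) : Int)) := by
  induction t generalizing b k with
  | nil => simp
  | cons c t ih =>
    have hcb := (PySem.List.le_foldl_max t c).1
    have hbb := (PySem.List.le_foldl_max t b).1
    by_cases h1 : b < c
    · have hbc : max b c = c := max_eq_right h1.le
      have hne : t.foldl max c ≠ b := fun h => absurd (h ▸ hcb) (not_le.mpr h1)
      have hstep : bstep (some (b, k)) c = some (c, 1) := by simp [bstep, h1]
      rw [List.foldl_cons, List.foldl_cons, hbc, hstep, ih c 1, if_neg hne, List.count_cons]
      by_cases hcm : t.foldl max c = c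
      · simp only [hcm, BEq.rfl, if_true]; push_cast; ring_nf
      · have hbeq : (c == t.foldl max c) = false := by
          simp only [beq_eq_false_iff_ne, ne_eq]; exact fun h => hcm h.symm
        simp [hcm, hbeq]
    · by_cases h2 : c = b
      · subst h2
        have hstep : bstep (some (c, k)) c = some (c, k + 1) := by simp [bstep]
        rw [List.foldl_cons, List.foldl_cons, max_self, hstep, ih c (k + 1), List.count_cons]
        by_cases hm : t.foldl max c = c
        · simp only [hm, BEq.rfl, if_true]; push_cast; ring_nf
        · have hbeq : (c == t.foldl max c) = false := by
            simp only [beq_eq_false_iff_ne, ne_eq]; exact fun h => hm h.symm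
          simp [hm, hbeq]
      · have hcb' : c < b := lt_of_le_of_ne (not_lt.mp h1) h2
        have hstep : bstep (some (b, k)) c = some (b, k) := by simp [bstep, h1, h2]
        have hbeq : (c == t.foldl max b) = false := by
          simp only [beq_eq_false_iff_ne, ne_eq]
          exact fun h => absurd hbb (not_le.mpr (h ▸ hcb'))
        rw [List.foldl_cons, List.foldl_cons, max_eq_left hcb'.le, hstep, ih b k,
          List.count_cons]
        simp [hbeq]

theorem bstep_run_none (x : Int) (t : List Int) :
    (x :: t).foldl bstep none =
      some (t.foldl max x, ((x :: t).count (t.foldl max x) : Int)) := by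
  have hstep : bstep none x = some (x, 1) := rfl
  rw [List.foldl_cons, hstep, bstep_run t x 1, List.count_cons]
  by_cases hm : t.foldl max x = x
  · simp only [hm, BEq.rfl, if_true]; push_cast; ring_nf
  · have hbeq : (x == t.foldl max x) = false := by
      simp only [beq_eq_false_iff_ne, ne_eq]; exact fun h => hm h.symm
    simp [hm, hbeq]

-- both ports, rewritten to pairScores of the same parsed-values list
theorem solution_eq (topics : List String) :
    solution topics =
      (match PySem.List.max? (pairScores (topics.map (fun t => (PySem.Int.ofStrBase? t 2).getD 0))) (fun x => x) with
       | none => ((0 : Int), (0 : Int))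
       | some m => (m, (PySem.Dict.counter (pairScores (topics.map (fun t => (PySem.Int.ofStrBase? t 2).getD 0)))).getD m 0)) := by
  have hlist :
      (PySem.List.pyRange 0 (PySem.List.len topics) 1).foldl (fun acc i =>
        (PySem.List.pyRange (i + 1) (PySem.List.len topics) 1).foldl (fun acc j =>
          acc ++ [(PySem.Int.bitCount (PySem.Int.bor
            ((PySem.Int.ofStrBase? (PySem.List.pyGetD topics i "") 2).getD 0)
            ((PySem.Int.ofStrBase? (PySem.List.pyGetD topics j "") 2).getD 0)) : Int)]) acc) [] =
      pairScores (topics.map (fun t => (PySem.Int.ofStrBase? t 2).getD 0)) := by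
    unfold pairScores
    have hlen : PySem.List.len (topics.map (fun t => (PySem.Int.ofStrBase? t 2).getD 0)) =
        PySem.List.len topics := by simp [PySem.List.len]
    rw [hlen]
    rw [PySem.List.foldl_congr_mem' (g := fun acc i =>
      acc ++ (PySem.List.pyRange (i + 1) (PySem.List.len topics) 1).map (fun j =>
        (PySem.Int.bitCount (PySem.Int.bor
          (PySem.List.pyGetD (topics.map (fun t => (PySem.Int.ofStrBase? t 2).getD 0)) i 0)
          (PySem.List.pyGetD (topics.map (fun t => (PySem.Int.ofStrBase? t 2).getD 0)) j 0)) : Int)))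
      (h := ?_)]
    · rw [PySem.List.foldl_append_eq_flatMap]; simp
    · intro i hi acc
      have hi' := (PySem.List.mem_pyRange_one).1 hi
      rw [PySem.List.foldl_congr_mem' (h := ?_)]
      · exact PySem.List.foldl_append_singleton_eq_map _ _ _
      · intro j hj acc'
        have hj' := (PySem.List.mem_pyRange_one).1 hj
        have hgi : PySem.List.pyGetD (topics.map (fun t => (PySem.Int.ofStrBase? t 2).getD 0)) i 0 =
            (PySem.Int.ofStrBase? (PySem.List.pyGetD topics i "") 2).getD 0 :=
          pyGetD_map_of_bounds _ topics i "" 0 hi'.1 (by simpa [PySem.List.len] using hi'.2)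
        have hgj : PySem.List.pyGetD (topics.map (fun t => (PySem.Int.ofStrBase? t 2).getD 0)) j 0 =
            (PySem.Int.ofStrBase? (PySem.List.pyGetD topics j "") 2).getD 0 :=
          pyGetD_map_of_bounds _ topics j "" 0 (by have := hi'.1; have := hj'.1; omega) (by simpa [PySem.List.len] using hj'.2)
        rw [hgi, hgj]
  unfold solution
  simp only [hlist]

theorem solution_alt_eq (topics : List String) :
    solution_alt topics =
      (match (pairScores (topics.map (fun t => (PySem.Int.ofStrBase? t 2).getD 0))).foldl bstep none with
       | none => ((0 : Int), (0 : Int))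
       | some (b, k) => (b, k)) := by
  unfold solution_alt
  have hfold : ∀ (vals : List Int),
      (PySem.List.pyRange 0 (PySem.List.len vals) 1).foldl (fun st i =>
        (PySem.List.pyRange (i + 1) (PySem.List.len vals) 1).foldl (fun st j =>
          bstep st (PySem.Int.bitCount (PySem.Int.bor
            (PySem.List.pyGetD vals i 0) (PySem.List.pyGetD vals j 0)))) st) none =
      (pairScores vals).foldl bstep none := by
    intro vals
    unfold pairScores
    rw [List.foldl_flatMap]
    refine PySem.List.foldl_congr_mem' _ _ _ _ ?_
    intro i _ st
    rw [List.foldl_map]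
  simp only [hfold]

-- ===== VERDICT (by name: the statement is the Claim_ definition above) =====
theorem solution_spec : Claim_equal_solution := by
  intro topics _ _
  unfold Spec_solution
  rw [solution_eq, solution_alt_eq]
  cases hL : pairScores (topics.map (fun t => (PySem.Int.ofStrBase? t 2).getD 0)) with
  | nil => simp [PySem.List.max?]
  | cons x t =>
    rw [PySem.List.max?_id_cons, bstep_run_none]
    simp [PySem.Dict.getD_counter]
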